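-- pv_equiv track=rewrite | github.com/pranshubhatt/news-analysis-dashboard | sentiment_analysis.py | check_for_negation
-- ===== SOURCE A (Python) =====
-- NEGATION_WORDS = [
--     'not', 'no', 'never', 'none', 'nobody', 'nothing', 'neither', 'nowhere',
--     'hardly', 'scarcely', 'barely', 'doesn\'t', 'isn\'t', 'wasn\'t', 'shouldn\'t',
--     'wouldn\'t', 'couldn\'t', 'won\'t', 'can\'t', 'don\'t'
-- ]
--
-- def check_for_negation(text, window_size=3):
--     """Check if a sentiment word is negated within a window of words"""
--     words = text.lower().split()
--     negated_indices = set()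
--
--     for i, word in enumerate(words):
--         if word in NEGATION_WORDS or word.endswith("n't"):
--             # Mark the next few words as negated
--             for j in range(i+1, min(i+window_size+1, len(words))):
--                 negated_indices.add(j)
--
--     return negated_indices
-- ===== SOURCE B (Python) =====
-- NEGATION_WORDS = [
--     'not', 'no', 'never', 'none', 'nobody', 'nothing', 'neither', 'nowhere',
--     'hardly', 'scarcely', 'barely', 'doesn\'t', 'isn\'t', 'wasn\'t', 'shouldn\'t',
--     'wouldn\'t', 'couldn\'t', 'won\'t', 'can\'t', 'don\'t'
-- ]
--
-- def check_for_negation(text, window_size=3):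
--     """Check if a sentiment word is negated within a window of words"""
--     words = text.lower().split()
--     negated_indices = set()
--     for j in range(len(words)):
--         if any(words[k] in NEGATION_WORDS or words[k].endswith("n't")
--                for k in range(max(0, j - window_size), j)):
--             negated_indices.add(j)
--     return negated_indices
-- ===== Notes on version B (the rewrite author's own statement) =====
-- stated objective: alternative
-- what changed: A forward-marks a window of following indices from every negation trigger into a growing set; B instead decides each index j independently by a backward any() scan over its preceding window, turning the nested marking loop into a per-index lookback test.
import Mathlib
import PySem

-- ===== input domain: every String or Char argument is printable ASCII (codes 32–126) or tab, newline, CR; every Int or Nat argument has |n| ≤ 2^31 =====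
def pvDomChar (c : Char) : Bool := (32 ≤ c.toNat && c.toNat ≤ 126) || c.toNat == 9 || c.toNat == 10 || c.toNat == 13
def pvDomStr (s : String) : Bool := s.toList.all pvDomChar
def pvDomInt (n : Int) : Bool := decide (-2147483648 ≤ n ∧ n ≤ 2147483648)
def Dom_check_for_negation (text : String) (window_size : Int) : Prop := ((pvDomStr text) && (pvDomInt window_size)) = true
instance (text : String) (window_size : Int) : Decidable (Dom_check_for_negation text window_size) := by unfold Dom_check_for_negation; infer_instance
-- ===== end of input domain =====

-- B replaces A's forward window-marking (each trigger adds the next window_size indices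
-- to a set) by an independent backward lookback test per index; alternative decomposition,
-- same asymptotic cost.

-- ===== PORT A =====
def pvNeg : List String :=
  ["not", "no", "never", "none", "nobody", "nothing", "neither", "nowhere",
   "hardly", "scarcely", "barely", "doesn't", "isn't", "wasn't", "shouldn't",
   "wouldn't", "couldn't", "won't", "can't", "don't"]

-- word in NEGATION_WORDS or word.endswith("n't")
def pvTrig (w : String) : Bool := pvNeg.contains w || PySem.Str.endswith w "n't"

def check_for_negation (text : String) (window_size : Int) : List Int :=
  let words := PySem.Str.split₀ (PySem.Str.lower text)
  (PySem.List.enumerate words).foldl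
    (fun acc p =>
      if pvTrig p.2 then
        (PySem.List.pyRange (p.1 + 1) (min (p.1 + window_size + 1) (words.length : Int)) 1).foldl
          (fun a j => PySem.Set.add a j) acc
      else acc)
    []

-- ===== PORT B =====
def check_for_negation_alt (text : String) (window_size : Int) : List Int :=
  let words := PySem.Str.split₀ (PySem.Str.lower text)
  (PySem.List.pyRange 0 (words.length : Int) 1).foldl
    (fun out j =>
      -- words[k] with max(0, j-window_size) ≤ k < j is always in range, so pyGetD is exact here
      if (PySem.List.pyRange (max 0 (j - window_size)) j 1).any
           (fun k => pvTrig (PySem.List.pyGetD words k "")) then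
        PySem.Set.add out j
      else out)
    []

-- ===== PRECONDITION & SPEC =====
def Spec_check_for_negation (text : String) (window_size : Int) (out : List Int) : Prop := out = check_for_negation_alt text window_size
instance (text : String) (window_size : Int) (out : List Int) : Decidable (Spec_check_for_negation text window_size out) := by unfold Spec_check_for_negation; infer_instance

-- ===== CLAIM (what is proved, stated in full; the proofs are below) =====
def Claim_equal_check_for_negation : Prop := ∀ (text : String) (window_size : Int), Dom_check_for_negation text window_size → Spec_check_for_negation text window_size (check_for_negation text window_size)

-- ===== LEMMAS AND PROOFS =====

-- A's "index x is negated after the first m words were processed" predicate.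
def pvQ (W : List String) (ws : Int) (m : Int) (x : Int) : Bool :=
  (PySem.List.pyRange 0 m 1).any
    (fun i => pvTrig (PySem.List.pyGetD W i "") &&
      decide (i + 1 ≤ x ∧ x < min (i + ws + 1) (W.length : Int)))

def pvR (W : List String) (ws : Int) (m : Int) (j : Int) (x : Int) : Bool :=
  pvQ W ws m x ||
    (decide (m + 1 ≤ x ∧ x < min (m + ws + 1) (W.length : Int)) && decide (x < j))

lemma pv_filter_append {p : Int → Bool} {j : Int} :
    ∀ (l : List Int), l.Pairwise (· < ·) → j ∈ l → p j = false →
      (∀ x ∈ l, j < x → p x = false) →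
      l.filter p ++ [j] = l.filter (fun x => p x || x == j) := by
  intro l
  induction l with
  | nil => intro _ hj; simp at hj
  | cons a l ih =>
    intro hl hj hpj hall
    have ha := (List.pairwise_cons.mp hl).1
    have hl' := (List.pairwise_cons.mp hl).2
    rcases List.mem_cons.mp hj with rfl | hjl
    · -- j = a
      have h1 : l.filter p = [] := by
        apply List.filter_eq_nil_iff.mpr
        intro x hx
        simp [hall x (List.mem_cons_of_mem _ hx) (ha x hx)]
      have h2 : l.filter (fun x => p x || x == j) = [] := by
        apply List.filter_eq_nil_iff.mpr
        intro x hx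
        have := ha x hx
        simp [hall x (List.mem_cons_of_mem _ hx) this]
        omega
      simp [hpj, h1, h2]
    · have haj : a < j := ha j hjl
      have : (a == j) = false := by simp; omega
      by_cases hpa : p a = true
      · simp [hpa, this]
        exact ih hl' hjl hpj (fun x hx h2 => hall x (List.mem_cons_of_mem _ hx) h2)
      · simp at hpa
        simp [hpa, this]
        exact ih hl' hjl hpj (fun x hx h2 => hall x (List.mem_cons_of_mem _ hx) h2)

lemma pv_add_filter {p : Int → Bool} {j : Int} (l : List Int)
    (hl : l.Pairwise (· < ·)) (hj : j ∈ l)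
    (h : p j = true ∨ ∀ x ∈ l, j < x → p x = false) :
    PySem.Set.add (l.filter p) j = l.filter (fun x => p x || x == j) := by
  by_cases hpj : p j = true
  · have hmem : j ∈ l.filter p := List.mem_filter.mpr ⟨hj, hpj⟩
    rw [PySem.Set.add_of_mem hmem]
    apply List.filter_congr
    intro x hx
    by_cases hxj : x = j
    · subst hxj; simp [hpj]
    · simp [hxj]
  · have hpj' : p j = false := by simpa using hpj
    have hall := h.resolve_left hpj
    have hnot : j ∉ l.filter p := by
      intro hc
      exact hpj ((List.mem_filter.mp hc).2)
    rw [PySem.Set.add_of_not_mem hnot]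
    exact pv_filter_append l hl hj hpj' hall

lemma pv_bfold (p : Int → Bool) :
    ∀ (l : List Int) (acc : List Int), l.Nodup → (∀ x ∈ l, x ∉ acc) →
      l.foldl (fun out j => if p j then PySem.Set.add out j else out) acc
        = acc ++ l.filter p := by
  intro l
  induction l with
  | nil => simp
  | cons a l ih =>
    intro acc hnd hfr
    have hna : a ∉ acc := hfr a (List.mem_cons_self ..)
    by_cases hpa : p a = true
    · simp only [List.foldl_cons, hpa, if_true, PySem.Set.add_of_not_mem hna]
      rw [ih (acc ++ [a]) (List.nodup_cons.mp hnd).2]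
      · simp [hpa]
      · intro x hx
        simp only [List.mem_append, List.mem_singleton]
        rw [not_or]
        exact ⟨hfr x (List.mem_cons_of_mem _ hx),
          fun hxa => (List.nodup_cons.mp hnd).1 (hxa ▸ hx)⟩
    · simp only [List.foldl_cons, hpa]
      rw [if_neg (by simp : ¬ (false = true)), ih acc (List.nodup_cons.mp hnd).2 (fun x hx => hfr x (List.mem_cons_of_mem _ hx))]
      simp [hpa]

lemma pvQ_down (W : List String) (ws : Int) (m j x : Int) (hj : m ≤ j) (hjx : j < x)
    (hq : pvQ W ws m x = true) : pvQ W ws m j = true := by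
  unfold pvQ at hq ⊢
  simp only [List.any_eq_true, PySem.List.mem_pyRange_one, Bool.and_eq_true,
    decide_eq_true_eq] at hq ⊢
  obtain ⟨i, ⟨hi0, him⟩, htrig, hix, hxw⟩ := hq
  exact ⟨i, ⟨hi0, him⟩, htrig, by omega, by omega⟩

lemma pv_inner_base (W : List String) (ws : Int) (m j : Int)
    (hend : min (m + ws + 1) (W.length : Int) ≤ j) :
    (PySem.List.pyRange j (min (m + ws + 1) (W.length : Int)) 1).foldl
        (fun a k => PySem.Set.add a k)
        ((PySem.List.pyRange 0 (W.length : Int) 1).filter (pvR W ws m j))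
      = (PySem.List.pyRange 0 (W.length : Int) 1).filter
          (pvR W ws m (min (m + ws + 1) (W.length : Int))) := by
  have hnil : PySem.List.pyRange j (min (m + ws + 1) (W.length : Int)) 1 = [] :=
    PySem.List.pyRange_one_eq_nil (by omega)
  rw [hnil]
  simp only [List.foldl_nil]
  apply List.filter_congr
  intro x hx
  unfold pvR
  by_cases hw : m + 1 ≤ x ∧ x < min (m + ws + 1) (W.length : Int)
  · have hxj : decide (x < j) = true := by
      simp only [decide_eq_true_eq]
      have := hw.2
      omega
    have hxb : decide (x < min (m + ws + 1) (W.length : Int)) = true := by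
      simp only [decide_eq_true_eq]
      exact hw.2
    rw [hxj, hxb]
  · rw [decide_eq_false hw]
    simp

lemma pv_inner (W : List String) (ws : Int) (m : Int) (hm : 0 ≤ m) :
    ∀ (fuel : Nat) (j : Int), m + 1 ≤ j →
      min (m + ws + 1) (W.length : Int) - j ≤ (fuel : Int) →
      (PySem.List.pyRange j (min (m + ws + 1) (W.length : Int)) 1).foldl
          (fun a k => PySem.Set.add a k)
          ((PySem.List.pyRange 0 (W.length : Int) 1).filter (pvR W ws m j))
        = (PySem.List.pyRange 0 (W.length : Int) 1).filter
            (pvR W ws m (min (m + ws + 1) (W.length : Int))) := by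
  intro fuel
  induction fuel with
  | zero =>
    intro j hj hfuel
    exact pv_inner_base W ws m j (by omega)
  | succ fuel ih =>
    intro j hj hfuel
    by_cases hend : min (m + ws + 1) (W.length : Int) ≤ j
    · exact pv_inner_base W ws m j hend
    · rw [not_le] at hend
      have hcons : PySem.List.pyRange j (min (m + ws + 1) (W.length : Int)) 1
          = j :: PySem.List.pyRange (j + 1) (min (m + ws + 1) (W.length : Int)) 1 :=
        PySem.List.pyRange_one_cons (by omega)
      rw [hcons]
      simp only [List.foldl_cons]
      have hjmem : j ∈ PySem.List.pyRange 0 (W.length : Int) 1 := by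
        rw [PySem.List.mem_pyRange_one]
        constructor <;> omega
      have hstep : PySem.Set.add
          ((PySem.List.pyRange 0 (W.length : Int) 1).filter (pvR W ws m j)) j
          = (PySem.List.pyRange 0 (W.length : Int) 1).filter (pvR W ws m (j + 1)) := by
        rw [pv_add_filter _ (PySem.List.pairwise_lt_pyRange_one 0 (W.length : Int)) hjmem]
        · apply List.filter_congr
          intro x hx
          by_cases hxj : x = j
          · subst hxj
            have hwj : m + 1 ≤ x ∧ x < min (m + ws + 1) (W.length : Int) := ⟨hj, hend⟩
            simp [pvR, hwj]
          · have : (x == j) = false := by simp [hxj]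
            simp only [pvR, this, Bool.or_false]
            have : (decide (x < j + 1)) = (decide (x < j)) := by
              simp only [decide_eq_decide]; omega
            rw [this]
        · by_cases hpj : pvR W ws m j j = true
          · exact Or.inl hpj
          · right
            intro x hx hjx
            simp only [Bool.not_eq_true] at hpj
            unfold pvR at hpj ⊢
            simp only [Bool.or_eq_false_iff, Bool.and_eq_false_iff] at hpj ⊢
            refine ⟨?_, Or.inr (by simp; omega)⟩
            by_cases hq : pvQ W ws m x = true
            · exact absurd (pvQ_down W ws m j x (by omega) hjx hq) (by simp [hpj.1])
            · simpa using hq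
      rw [hstep]
      exact ih (j + 1) (by omega) (by omega)

lemma pvR_start (W : List String) (ws : Int) (m : Int) (x : Int) :
    pvR W ws m (m + 1) x = pvQ W ws m x := by
  unfold pvR
  by_cases hw : m + 1 ≤ x ∧ x < min (m + ws + 1) (W.length : Int)
  · have h2 : decide (x < m + 1) = false := by simp only [decide_eq_false_iff_not]; omega
    rw [h2, Bool.and_false, Bool.or_false]
  · rw [decide_eq_false hw]; simp

lemma pv_getD (W : List String) (m : Nat) (h : m < W.length) :
    PySem.List.pyGetD W ((m : Int)) "" = W[m] := by
  simp [PySem.List.pyGetD_natCast, h]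

lemma pvQ_succ (W : List String) (ws : Int) (m : Int) (hm : 0 ≤ m) (x : Int) :
    pvQ W ws (m + 1) x
      = (pvQ W ws m x ||
          (pvTrig (PySem.List.pyGetD W m "") &&
            decide (m + 1 ≤ x ∧ x < min (m + ws + 1) (W.length : Int)))) := by
  unfold pvQ
  have hsp : PySem.List.pyRange 0 (m + 1) 1 = PySem.List.pyRange 0 m 1 ++ [m] :=
    PySem.List.pyRange_one_succ_right hm
  rw [hsp, List.any_append, List.any_cons, List.any_nil, Bool.or_false]

lemma pvR_end (W : List String) (ws : Int) (m : Int) (hm : 0 ≤ m)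
    (htr : pvTrig (PySem.List.pyGetD W m "") = true) (x : Int) :
    pvR W ws m (min (m + ws + 1) (W.length : Int)) x = pvQ W ws (m + 1) x := by
  rw [pvQ_succ W ws m hm x, htr, Bool.true_and]
  unfold pvR
  by_cases hw : m + 1 ≤ x ∧ x < min (m + ws + 1) (W.length : Int)
  · have h1 : decide (x < min (m + ws + 1) (W.length : Int)) = true := by
      simp only [decide_eq_true_eq]; exact hw.2
    rw [h1, Bool.and_true]
  · rw [decide_eq_false hw, Bool.false_and]

lemma pv_outer (W : List String) (ws : Int) :
    ∀ (m : Nat), m ≤ W.length →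
      (PySem.List.enumerate (W.take m)).foldl
        (fun acc p =>
          if pvTrig p.2 then
            (PySem.List.pyRange (p.1 + 1) (min (p.1 + ws + 1) (W.length : Int)) 1).foldl
              (fun a j => PySem.Set.add a j) acc
          else acc)
        []
      = (PySem.List.pyRange 0 (W.length : Int) 1).filter (pvQ W ws (m : Int)) := by
  intro m
  induction m with
  | zero =>
    intro _
    have h0 : PySem.List.pyRange 0 (0 : Int) 1 = [] := PySem.List.pyRange_one_eq_nil le_rfl
    simp [PySem.List.enumerate_nil, pvQ, h0]
  | succ m ih =>
    intro hm1
    have hmlt : m < W.length := by omega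
    have htake : W.take (m + 1) = W.take m ++ [W[m]] := by
      rw [List.take_add_one]
      simp [List.getElem?_eq_getElem hmlt]
    rw [htake, PySem.List.enumerate_append, List.foldl_append]
    rw [ih (by omega)]
    have hlen : ((W.take m).length : Int) = (m : Int) := by
      simp [List.length_take]; omega
    simp only [PySem.List.enumerate_cons, PySem.List.enumerate_nil, List.foldl_cons, List.foldl_nil]
    rw [hlen]
    have hc : ((m : Int) + 1) = ((m + 1 : Nat) : Int) := by push_cast; ring
    by_cases htr : pvTrig W[m] = true
    · simp only [htr, if_true, zero_add]
      have hstart : List.filter (pvQ W ws (m : Int)) (PySem.List.pyRange 0 (W.length : Int) 1)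
          = List.filter (pvR W ws (m : Int) ((m : Int) + 1)) (PySem.List.pyRange 0 (W.length : Int) 1) :=
        List.filter_congr (fun x _ => (pvR_start W ws (m : Int) x).symm)
      rw [hstart,
        pv_inner W ws (m : Int) (by omega)
          ((min ((m : Int) + ws + 1) (W.length : Int) - ((m : Int) + 1)).toNat)
          ((m : Int) + 1) le_rfl (by omega)]
      rw [← hc]
      apply List.filter_congr
      intro x _
      exact pvR_end W ws (m : Int) (by omega) (by rw [pv_getD W m hmlt]; exact htr) x
    · simp only [htr]
      rw [← hc]
      apply List.filter_congr
      intro x _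
      have := pvQ_succ W ws (m : Int) (by omega) x
      rw [this, pv_getD W m hmlt, (by simpa using htr : pvTrig W[m] = false), Bool.false_and, Bool.or_false]

lemma pv_pred_eq (W : List String) (ws : Int) (x : Int) (_hx0 : 0 ≤ x)
    (hxn : x < (W.length : Int)) :
    ((PySem.List.pyRange (max 0 (x - ws)) x 1).any
        (fun k => pvTrig (PySem.List.pyGetD W k ""))) = pvQ W ws (W.length : Int) x := by
  unfold pvQ
  rw [Bool.eq_iff_iff]
  simp only [List.any_eq_true, PySem.List.mem_pyRange_one, Bool.and_eq_true, decide_eq_true_eq]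
  constructor
  · rintro ⟨k, ⟨hk1, hk2⟩, htrig⟩
    exact ⟨k, ⟨by omega, by omega⟩, htrig, by omega, by omega⟩
  · rintro ⟨i, ⟨hi0, hin⟩, htrig, hix, hxw⟩
    exact ⟨i, ⟨by omega, by omega⟩, htrig⟩

lemma pv_main (W : List String) (ws : Int) :
    (PySem.List.enumerate W).foldl
      (fun acc p =>
        if pvTrig p.2 then
          (PySem.List.pyRange (p.1 + 1) (min (p.1 + ws + 1) (W.length : Int)) 1).foldl
            (fun a j => PySem.Set.add a j) acc
        else acc)
      []
    = (PySem.List.pyRange 0 (W.length : Int) 1).foldl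
        (fun out j =>
          if (PySem.List.pyRange (max 0 (j - ws)) j 1).any
               (fun k => pvTrig (PySem.List.pyGetD W k "")) then
            PySem.Set.add out j
          else out)
        [] := by
  have hA := pv_outer W ws W.length le_rfl
  rw [List.take_length] at hA
  have hB := pv_bfold
    (fun j => (PySem.List.pyRange (max 0 (j - ws)) j 1).any
      (fun k => pvTrig (PySem.List.pyGetD W k "")))
    (PySem.List.pyRange 0 (W.length : Int) 1) []
    (PySem.List.nodup_pyRange_one 0 (W.length : Int)) (by simp)
  rw [hA, hB, List.nil_append]
  apply List.filter_congr
  intro x hx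
  rw [PySem.List.mem_pyRange_one] at hx
  exact (pv_pred_eq W ws x hx.1 hx.2).symm

-- ===== VERDICT (by name: the statement is the Claim_ definition above) =====
theorem check_for_negation_spec : Claim_equal_check_for_negation := by
  intro text window_size _
  unfold Spec_check_for_negation check_for_negation check_for_negation_alt
  exact pv_main (PySem.Str.split₀ (PySem.Str.lower text)) window_size
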